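-- pv_equiv track=rewrite | github.com/ducktin/adventofcode | 2018/08/2.py | process_child
-- ===== SOURCE A (Python) =====
-- def process_child(license_file, start) -> (int, int):
--     value = 0
--     shift = start + 2
--
--     num_of_children = license_file[start]
--     num_of_metadata = license_file[start + 1]
--
--     children = [0]
--     for _ in range(num_of_children):
--         result = process_child(license_file, shift)
--
--         shift += result[0]
--         child_value = result[1]
--
--         children.append(child_value)
--     for i in range(num_of_metadata):
--         meta = license_file[shift + i]
--         if len(children) == 1:
--             value += meta
--         elif len(children) > meta:
--             value += children[meta]
--
--     processed_nodes = shift + num_of_metadata - start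
--     return (processed_nodes, value)
-- ===== SOURCE B (Python) =====
-- def process_child(license_file, start):
--     # Iterative parse with an explicit stack of in-progress nodes instead of recursion.
--     # Frame: [remaining_children, num_metadata, children] with children = [0] + computed child values.
--     pos = start + 2
--     stack = [[license_file[start], license_file[start + 1], [0]]]
--     while True:
--         top = stack[-1]
--         if top[0] > 0:
--             top[0] -= 1
--             stack.append([license_file[pos], license_file[pos + 1], [0]])
--             pos += 2
--         else:
--             num_metadata, children = top[1], top[2]
--             value = 0
--             for i in range(num_metadata):
--                 meta = license_file[pos + i]
--                 if len(children) == 1: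
--                     value += meta
--                 elif len(children) > meta:
--                     value += children[meta]
--             pos += num_metadata
--             stack.pop()
--             if not stack:
--                 return (pos - start, value)
--             stack[-1][2].append(value)
-- ===== Notes on version B (the rewrite author's own statement) =====
-- stated objective: alternative
-- what changed: Replaces A's recursive descent with an iterative single scan driven by an explicit stack of in-progress frames (remaining children, metadata count, collected child values), so node values are combined on pop instead of on return from recursion.
import Mathlib
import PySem

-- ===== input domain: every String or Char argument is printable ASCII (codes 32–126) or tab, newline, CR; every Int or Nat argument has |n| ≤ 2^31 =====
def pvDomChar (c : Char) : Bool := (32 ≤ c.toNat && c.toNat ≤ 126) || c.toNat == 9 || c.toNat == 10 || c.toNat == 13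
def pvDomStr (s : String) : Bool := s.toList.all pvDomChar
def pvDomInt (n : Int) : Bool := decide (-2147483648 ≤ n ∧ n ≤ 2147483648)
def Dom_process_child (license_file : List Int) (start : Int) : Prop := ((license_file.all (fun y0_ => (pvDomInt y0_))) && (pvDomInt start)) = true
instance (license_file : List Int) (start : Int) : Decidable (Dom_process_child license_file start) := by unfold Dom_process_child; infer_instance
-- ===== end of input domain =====

-- B rewrites A's recursive descent as an iterative scan with an explicit stack of
-- in-progress frames (alternative decomposition; same asymptotic cost).
-- Both ports are fueled transliterations; fuel only guards totality (Python A recurses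
-- without bound / raises on malformed input, which Pre_ excludes).

-- ===== PORT A =====
-- shared metadata loop: this loop is textually identical in Source A and Source B
-- (for i in range(num_of_metadata): mta = lf[pos+i]; if len(children)==1: v+=mta
--  elif len(children)>mta: v+=children[mta]); `none` = IndexError on children[mta].
def pvMetaLoop (lf : List Int) (k : Nat) (pos : Int) (children : List Int) (value : Int) : Option Int :=
  match k with
  | 0 => some value
  | k+1 =>
    match PySem.List.pyGet? lf pos with
    | none => none
    | some mta =>
      if children.length = 1 then pvMetaLoop lf k (pos+1) children (value + mta)
      else if (children.length : Int) > mta then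
        match PySem.List.pyGet? children mta with
        | none => none
        | some cv => pvMetaLoop lf k (pos+1) children (value + cv)
      else pvMetaLoop lf k (pos+1) children value

mutual
  -- recursive descent of Source A; fuel bounds recursion depth only
  def pcA (lf : List Int) (fuel : Nat) (pos : Int) : Option (Int × Int) :=
    match fuel with
    | 0 => none
    | f+1 =>
      match PySem.List.pyGet? lf pos, PySem.List.pyGet? lf (pos+1) with
      | some nc, some nm =>
        match pcAKids lf f nc.toNat (pos+2) [0] with
        | none => none
        | some (shift, children) =>
          match pvMetaLoop lf nm.toNat shift children 0 with
          | none => none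
          | some value => some (shift + nm - pos, value)
      | _, _ => none
  termination_by (fuel, 0, 0)
  -- the `for _ in range(num_of_children)` loop of Source A
  def pcAKids (lf : List Int) (fuel : Nat) (k : Nat) (pos : Int) (children : List Int) : Option (Int × List Int) :=
    match k with
    | 0 => some (pos, children)
    | k+1 =>
      match pcA lf fuel pos with
      | none => none
      | some r => pcAKids lf fuel k (pos + r.1) (children ++ [r.2])
  termination_by (fuel, 1, k)
end

def process_child (license_file : List Int) (start : Int) : Int × Int :=
  (pcA license_file (2 * license_file.length + 2) start).getD (0, 0)

-- ===== PORT B =====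
-- fuel bound for the stack machine: enough loop iterations for any parse that the
-- depth-fueled grammar admits, given every header entry is ≤ 2^31 (Dom)
def pvBound : Nat → Nat
  | 0 => 0
  | d+1 => 2147483648 * (pvBound d + 2)

-- the while-True loop of Source B; state = (cursor, stack of frames
-- (remaining_children, num_metadata, children)); head of the list = top of the stack
def pcB (lf : List Int) (start : Int) (fuel : Nat) (pos : Int) (stack : List (Int × Int × List Int)) : Option (Int × Int) :=
  match fuel with
  | 0 => none
  | f+1 =>
    match stack with
    | [] => none
    | (rc, nm, ch) :: rest =>
      if rc > 0 then
        match PySem.List.pyGet? lf pos, PySem.List.pyGet? lf (pos+1) with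
        | some c, some m => pcB lf start f (pos+2) ((c, m, [0]) :: (rc-1, nm, ch) :: rest)
        | _, _ => none
      else
        match pvMetaLoop lf nm.toNat pos ch 0 with
        | none => none
        | some value =>
          match rest with
          | [] => some (pos + nm - start, value)
          | (rc2, nm2, ch2) :: rest2 => pcB lf start f (pos + nm) ((rc2, nm2, ch2 ++ [value]) :: rest2)

def process_child_alt (license_file : List Int) (start : Int) : Int × Int :=
  match PySem.List.pyGet? license_file start, PySem.List.pyGet? license_file (start+1) with
  | some c, some m =>
    (pcB license_file start (pvBound (2 * license_file.length + 2) + 2) (start+2) [(c, m, [0])]).getD (0, 0)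
  | _, _ => (0, 0)

-- ===== PRECONDITION & SPEC =====
-- grammar-membership checker (sizes only, no values): does the token stream at `pos`
-- form a complete node, with every index access Python-valid?
def chkMeta (lf : List Int) (k : Nat) (pos : Int) (clen : Int) : Bool :=
  match k with
  | 0 => true
  | k+1 =>
    match PySem.List.pyGet? lf pos with
    | none => false
    | some mta => (clen == 1 || decide (-clen ≤ mta)) && chkMeta lf k (pos+1) clen

-- kids loop of the checker, parameterised by the node checker one fuel level down
def chkKidsF (node : Int → Option Int) (k : Nat) (pos : Int) : Option Int :=
  match k with
  | 0 => some pos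
  | k+1 =>
    match node pos with
    | none => none
    | some sz => chkKidsF node k (pos + sz)

def chkNode (lf : List Int) : Nat → Int → Option Int
  | 0, _ => none
  | f+1, pos =>
    match PySem.List.pyGet? lf pos, PySem.List.pyGet? lf (pos+1) with
    | some nc, some nm =>
      match chkKidsF (chkNode lf f) nc.toNat (pos+2) with
      | none => none
      | some shift =>
        if chkMeta lf nm.toNat shift ((nc.toNat : Int) + 1) then some (shift + nm - pos) else none
    | _, _ => none

-- Pre_: the tokens from `start` encode one complete node of the license grammar:
-- a readable 2-entry header, `num_children` child encodings in sequence, then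
-- `num_metadata` in-range metadata entries each of which indexes the children list
-- Python-validly.  Membership in this recursive grammar has no closed form over
-- List Int; chkNode/chkKidsF/chkMeta state the grammar directly (they compute only
-- the token count of each node, never either program's value).  Pre_ holds exactly
-- where Python A returns instead of raising.
def Pre_process_child (license_file : List Int) (start : Int) : Prop :=
  (chkNode license_file (2 * license_file.length + 2) start).isSome = true
instance (license_file : List Int) (start : Int) : Decidable (Pre_process_child license_file start) := by unfold Pre_process_child; infer_instance

def pvWitness_process_child : List Int × Int := ([2, 3, 0, 3, 10, 11, 12, 1, 1, 0, 1, 99, 2, 1, 1, 2], 0)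

def Spec_process_child (license_file : List Int) (start : Int) (out : Int × Int) : Prop := out = process_child_alt license_file start
instance (license_file : List Int) (start : Int) (out : Int × Int) : Decidable (Spec_process_child license_file start out) := by unfold Spec_process_child; infer_instance

-- ===== CLAIM (what is proved, stated in full; the proofs are below) =====
def Claim_equal_process_child : Prop := ∀ (license_file : List Int) (start : Int), Dom_process_child license_file start → Pre_process_child license_file start → Spec_process_child license_file start (process_child license_file start)

-- ===== LEMMAS AND PROOFS =====

theorem metaLoop_of_chk (lf : List Int) (k : Nat) : ∀ (pos : Int) (ch : List Int) (v0 : Int),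
    1 ≤ ch.length → chkMeta lf k pos (ch.length : Int) = true →
    ∃ v, pvMetaLoop lf k pos ch v0 = some v := by
  induction k with
  | zero => intro pos ch v0 _ _; exact ⟨v0, rfl⟩
  | succ k ih =>
    intro pos ch v0 h1 h2
    unfold chkMeta at h2
    cases hg : PySem.List.pyGet? lf pos with
    | none => rw [hg] at h2; simp at h2
    | some mta =>
      rw [hg] at h2
      simp only [Bool.and_eq_true] at h2
      obtain ⟨hc, hrec⟩ := h2
      simp only [pvMetaLoop, hg]
      by_cases hl : ch.length = 1
      · rw [if_pos hl]
        exact ih (pos+1) ch (v0+mta) h1 hrec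
      · rw [if_neg hl]
        by_cases hgt : (ch.length : Int) > mta
        · rw [if_pos hgt]
          have hge : -(ch.length : Int) ≤ mta := by
            rcases Bool.or_eq_true _ _ |>.mp hc with h | h
            · exact absurd (beq_iff_eq.mp h) (by exact_mod_cast fun hh => hl (by exact_mod_cast hh))
            · exact of_decide_eq_true h
          have hin : PySem.Raise.InRange ch.length mta := ⟨hge, hgt⟩
          cases hg2 : PySem.List.pyGet? ch mta with
          | none => exact absurd hin ((PySem.List.pyGet?_eq_none_iff ch mta).mp hg2)
          | some cv => exact ih (pos+1) ch (v0+cv) h1 hrec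
        · rw [if_neg hgt]
          exact ih (pos+1) ch v0 h1 hrec

theorem pcA_of_chk : ∀ (f : Nat) (lf : List Int) (pos sz : Int),
    chkNode lf f pos = some sz → ∃ v, pcA lf f pos = some (sz, v) := by
  intro f
  induction f with
  | zero => intro lf pos sz h; simp [chkNode] at h
  | succ f ih =>
    intro lf pos sz h
    have kids : ∀ (k : Nat) (pos pos' : Int), chkKidsF (chkNode lf f) k pos = some pos' →
        ∀ ch : List Int, ∃ ch', pcAKids lf f k pos ch = some (pos', ch') ∧ ch'.length = ch.length + k := by
      intro k
      induction k with
      | zero =>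
        intro pos pos' hk ch
        simp only [chkKidsF] at hk
        obtain rfl : pos = pos' := by simpa using hk
        exact ⟨ch, by simp [pcAKids], by simp⟩
      | succ k ihk =>
        intro pos pos' hk ch
        cases hn : chkNode lf f pos with
        | none => simp only [chkKidsF, hn] at hk; exact absurd hk (by simp)
        | some sz1 =>
          simp only [chkKidsF, hn] at hk
          obtain ⟨v1, hA⟩ := ih lf pos sz1 hn
          obtain ⟨ch', hK, hlen⟩ := ihk (pos+sz1) pos' hk (ch ++ [v1])
          exact ⟨ch', by simp only [pcAKids, hA, hK], by simp at hlen; omega⟩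
    cases hg1 : PySem.List.pyGet? lf pos with
    | none => simp only [chkNode, hg1] at h; exact absurd h (by simp)
    | some nc =>
      cases hg2 : PySem.List.pyGet? lf (pos+1) with
      | none => simp only [chkNode, hg1, hg2] at h; exact absurd h (by simp)
      | some nm =>
        cases hkk : chkKidsF (chkNode lf f) nc.toNat (pos+2) with
        | none => simp only [chkNode, hg1, hg2, hkk] at h; exact absurd h (by simp)
        | some shift =>
          simp only [chkNode, hg1, hg2, hkk] at h
          obtain ⟨ch1, hK, hlen⟩ := kids nc.toNat (pos+2) shift hkk [0]
          by_cases hm : chkMeta lf nm.toNat shift ((nc.toNat : Int) + 1) = true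
          · rw [if_pos hm] at h
            have hl1 : ch1.length = nc.toNat + 1 := by simp at hlen; omega
            have hm' : chkMeta lf nm.toNat shift ((ch1.length : Int)) = true := by
              rw [hl1]; push_cast; simpa using hm
            obtain ⟨v, hv⟩ := metaLoop_of_chk lf nm.toNat shift ch1 0 (by omega) hm'
            refine ⟨v, ?_⟩
            simp only [pcA, hg1, hg2, hK, hv]
            simp only [Option.some.injEq] at h
            rw [h]
          · rw [if_neg hm] at h; exact absurd h (by simp)

theorem pcA_inv (lf : List Int) (f : Nat) (pos : Int) (r : Int × Int)
    (h : pcA lf f pos = some r) :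
    ∃ f0 c m shift ch v, f = f0 + 1 ∧
      PySem.List.pyGet? lf pos = some c ∧ PySem.List.pyGet? lf (pos+1) = some m ∧
      pcAKids lf f0 c.toNat (pos+2) [0] = some (shift, ch) ∧
      pvMetaLoop lf m.toNat shift ch 0 = some v ∧ r = (shift + m - pos, v) := by
  cases f with
  | zero => simp [pcA] at h
  | succ f0 =>
    cases hg1 : PySem.List.pyGet? lf pos with
    | none => simp only [pcA, hg1] at h; exact absurd h (by simp)
    | some nc =>
      cases hg2 : PySem.List.pyGet? lf (pos+1) with
      | none => simp only [pcA, hg1, hg2] at h; exact absurd h (by simp)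
      | some nm =>
        cases hkk : pcAKids lf f0 nc.toNat (pos+2) [0] with
        | none => simp only [pcA, hg1, hg2, hkk] at h; exact absurd h (by simp)
        | some sc =>
          obtain ⟨shift, ch⟩ := sc
          cases hmv : pvMetaLoop lf nm.toNat shift ch 0 with
          | none => simp only [pcA, hg1, hg2, hkk, hmv] at h; exact absurd h (by simp)
          | some v =>
            simp only [pcA, hg1, hg2, hkk, hmv, Option.some.injEq] at h
            exact ⟨f0, nc, nm, shift, ch, v, rfl, rfl, rfl, hkk, hmv, h.symm⟩

-- one-step unfoldings of the machine
theorem pcB_step_push (lf : List Int) (st : Int) (f : Nat) (pos : Int) (rc nm : Int) (ch : List Int)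
    (rest : List (Int × Int × List Int)) (c m : Int) (hrc : rc > 0)
    (hg1 : PySem.List.pyGet? lf pos = some c) (hg2 : PySem.List.pyGet? lf (pos+1) = some m) :
    pcB lf st (f+1) pos ((rc, nm, ch) :: rest) = pcB lf st f (pos+2) ((c, m, [0]) :: (rc-1, nm, ch) :: rest) := by
  conv_lhs => rw [pcB]
  simp only [hg1, hg2, if_pos hrc]

theorem pcB_step_push_none (lf : List Int) (st : Int) (f : Nat) (pos : Int) (rc nm : Int) (ch : List Int)
    (rest : List (Int × Int × List Int)) (hrc : rc > 0)
    (hg : PySem.List.pyGet? lf pos = none ∨ PySem.List.pyGet? lf (pos+1) = none) :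
    pcB lf st (f+1) pos ((rc, nm, ch) :: rest) = none := by
  conv_lhs => rw [pcB]
  rcases hg with hg | hg
  · simp only [hg, if_pos hrc]
  · simp only [hg, if_pos hrc]
    all_goals first | rfl | (cases PySem.List.pyGet? lf pos <;> rfl)

theorem pcB_step_pop (lf : List Int) (st : Int) (f : Nat) (pos : Int) (rc nm : Int) (ch : List Int)
    (rest : List (Int × Int × List Int)) (v : Int) (hrc : ¬ rc > 0)
    (hmv : pvMetaLoop lf nm.toNat pos ch 0 = some v) :
    pcB lf st (f+1) pos ((rc, nm, ch) :: rest) =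
      (match rest with
       | [] => some (pos + nm - st, v)
       | (rc2, nm2, ch2) :: rest2 => pcB lf st f (pos + nm) ((rc2, nm2, ch2 ++ [v]) :: rest2)) := by
  conv_lhs => rw [pcB]
  simp only [if_neg hrc, hmv]

theorem pcB_step_pop_none (lf : List Int) (st : Int) (f : Nat) (pos : Int) (rc nm : Int) (ch : List Int)
    (rest : List (Int × Int × List Int)) (hrc : ¬ rc > 0)
    (hmv : pvMetaLoop lf nm.toNat pos ch 0 = none) :
    pcB lf st (f+1) pos ((rc, nm, ch) :: rest) = none := by
  conv_lhs => rw [pcB]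
  simp only [if_neg hrc, hmv]

theorem pcB_step_pop_cons (lf : List Int) (st : Int) (f : Nat) (pos : Int) (rc nm : Int) (ch : List Int)
    (rc2 nm2 : Int) (ch2 : List Int) (rest2 : List (Int × Int × List Int)) (v : Int) (hrc : ¬ rc > 0)
    (hmv : pvMetaLoop lf nm.toNat pos ch 0 = some v) :
    pcB lf st (f+1) pos ((rc, nm, ch) :: (rc2, nm2, ch2) :: rest2) =
      pcB lf st f (pos + nm) ((rc2, nm2, ch2 ++ [v]) :: rest2) := by
  rw [pcB_step_pop lf st f pos rc nm ch ((rc2, nm2, ch2) :: rest2) v hrc hmv]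

theorem pcB_step_pop_nil (lf : List Int) (st : Int) (f : Nat) (pos : Int) (rc nm : Int) (ch : List Int)
    (v : Int) (hrc : ¬ rc > 0) (hmv : pvMetaLoop lf nm.toNat pos ch 0 = some v) :
    pcB lf st (f+1) pos [(rc, nm, ch)] = some (pos + nm - st, v) := by
  rw [pcB_step_pop lf st f pos rc nm ch [] v hrc hmv]

theorem pcB_mono (lf : List Int) (st : Int) : ∀ (f : Nat) (pos : Int) (S : List (Int × Int × List Int)) (r : Int × Int),
    pcB lf st f pos S = some r → pcB lf st (f+1) pos S = some r := by
  intro f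
  induction f with
  | zero => intro pos S r h; simp [pcB] at h
  | succ f ih =>
    intro pos S r h
    match S with
    | [] => simp [pcB] at h
    | (rc, nm, ch) :: rest =>
      by_cases hrc : rc > 0
      · cases hg1 : PySem.List.pyGet? lf pos with
        | none => rw [pcB_step_push_none lf st f pos rc nm ch rest hrc (Or.inl hg1)] at h; exact absurd h (by simp)
        | some c =>
          cases hg2 : PySem.List.pyGet? lf (pos+1) with
          | none => rw [pcB_step_push_none lf st f pos rc nm ch rest hrc (Or.inr hg2)] at h; exact absurd h (by simp)
          | some m =>
            rw [pcB_step_push lf st f pos rc nm ch rest c m hrc hg1 hg2] at h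
            rw [pcB_step_push lf st (f+1) pos rc nm ch rest c m hrc hg1 hg2]
            exact ih _ _ _ h
      · cases hmv : pvMetaLoop lf nm.toNat pos ch 0 with
        | none => rw [pcB_step_pop_none lf st f pos rc nm ch rest hrc hmv] at h; exact absurd h (by simp)
        | some value =>
          rw [pcB_step_pop lf st f pos rc nm ch rest value hrc hmv] at h
          rw [pcB_step_pop lf st (f+1) pos rc nm ch rest value hrc hmv]
          match rest with
          | [] => exact h
          | (rc2, nm2, ch2) :: rest2 => exact ih _ _ _ h

theorem pcB_mono_le (lf : List Int) (st : Int) (f f' : Nat) (pos : Int) (S : List (Int × Int × List Int)) (r : Int × Int)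
    (hle : f ≤ f') (h : pcB lf st f pos S = some r) : pcB lf st f' pos S = some r := by
  induction f' with
  | zero =>
    have : f = 0 := by omega
    rw [this] at h; simp [pcB] at h
  | succ f' ih =>
    rcases Nat.lt_or_ge f (f'+1) with hlt | hge
    · exact pcB_mono lf st f' pos S r (ih (by omega))
    · have : f = f' + 1 := by omega
      rw [← this]; exact h

theorem pcB_nonpos (lf : List Int) (st : Int) (f : Nat) (pos : Int) (rc nm : Int) (ch : List Int)
    (S : List (Int × Int × List Int)) (h : ¬ rc > 0) :
    pcB lf st f pos ((rc, nm, ch) :: S) = pcB lf st f pos ((0, nm, ch) :: S) := by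
  cases f with
  | zero => rfl
  | succ f =>
    conv_lhs => rw [pcB]
    conv_rhs => rw [pcB]
    simp only [if_neg h, if_neg (by omega : ¬ (0:Int) > 0)]


theorem pcB_sim_kids (lf : List Int) (st : Int) (hdom : lf.all pvDomInt = true) :
    ∀ (f k : Nat) (rc pos : Int) (ch : List Int) (pos' : Int) (ch' : List Int) (nm : Int)
      (rest : List (Int × Int × List Int)),
      rc.toNat = k → pcAKids lf f k pos ch = some (pos', ch') →
      ∃ fb, fb ≤ k * (pvBound f + 2) ∧
        ∀ g, pcB lf st (fb + g) pos ((rc, nm, ch) :: rest) = pcB lf st g pos' ((0, nm, ch') :: rest) := by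
  intro f
  induction f with
  | zero =>
    intro k rc pos ch pos' ch' nm rest hrc hK
    cases k with
    | zero =>
      simp only [pcAKids, Option.some.injEq] at hK
      obtain ⟨rfl, rfl⟩ := Prod.mk.injEq .. ▸ (Prod.ext_iff.mp hK)
      exact ⟨0, by omega, fun g => by rw [Nat.zero_add]; exact pcB_nonpos lf st g pos rc nm ch rest (by omega)⟩
    | succ k => simp only [pcAKids, pcA] at hK; exact absurd hK (by simp)
  | succ f ihf =>
    intro k
    induction k with
    | zero =>
      intro rc pos ch pos' ch' nm rest hrc hK
      simp only [pcAKids, Option.some.injEq] at hK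
      obtain ⟨rfl, rfl⟩ := Prod.mk.injEq .. ▸ (Prod.ext_iff.mp hK)
      exact ⟨0, by omega, fun g => by rw [Nat.zero_add]; exact pcB_nonpos lf st g pos rc nm ch rest (by omega)⟩
    | succ k ihk =>
      intro rc pos ch pos' ch' nm rest hrc hK
      cases hA : pcA lf (f+1) pos with
      | none => simp only [pcAKids, hA] at hK; exact absurd hK (by simp)
      | some r =>
        simp only [pcAKids, hA] at hK
        obtain ⟨f0, c, m, shift1, ch1, v, hf0, hg1, hg2, hkk, hmv, hr⟩ := pcA_inv lf (f+1) pos r hA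
        have hff : f0 = f := by omega
        rw [hff] at hkk
        subst hr
        have hrcpos : rc > 0 := by omega
        have hrc1 : (rc - 1).toNat = k := by omega
        obtain ⟨f1, hf1le, hsim1⟩ := ihf c.toNat c (pos+2) [0] shift1 ch1 m ((rc-1, nm, ch) :: rest) rfl hkk
        simp only [] at hK
        obtain ⟨f2, hf2le, hsim2⟩ := ihk (rc-1) (pos + (shift1 + m - pos)) (ch ++ [v]) pos' ch' nm rest hrc1 hK
        have hcmem : c ∈ lf := PySem.List.mem_of_pyGet?_eq_some lf hg1
        have hcbound : c.toNat ≤ 2147483648 := by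
          have := List.all_eq_true.mp hdom c hcmem
          simp only [pvDomInt, decide_eq_true_eq] at this
          omega
        have hb1 : f1 ≤ pvBound (f+1) := by
          calc f1 ≤ c.toNat * (pvBound f + 2) := hf1le
          _ ≤ 2147483648 * (pvBound f + 2) := Nat.mul_le_mul_right _ hcbound
          _ = pvBound (f+1) := rfl
        refine ⟨f1 + f2 + 2, ?_, ?_⟩
        · calc f1 + f2 + 2 ≤ pvBound (f+1) + k * (pvBound (f+1) + 2) + 2 :=
                by exact Nat.add_le_add (Nat.add_le_add hb1 hf2le) le_rfl
          _ = (k+1) * (pvBound (f+1) + 2) := by ring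
        · intro g
          have e : f1 + f2 + 2 + g = (f1 + (1 + (f2 + g))) + 1 := by omega
          rw [e, pcB_step_push lf st _ pos rc nm ch rest c m hrcpos hg1 hg2]
          rw [hsim1 (1 + (f2 + g))]
          rw [Nat.add_comm 1 (f2 + g)]
          rw [pcB_step_pop_cons lf st _ shift1 0 m ch1 (rc-1) nm ch rest v (by omega) hmv]
          have e2 : shift1 + m = pos + (shift1 + m - pos) := by omega
          rw [show pcB lf st (f2 + g) (shift1 + m) ((rc - 1, nm, ch ++ [v]) :: rest) =
              pcB lf st (f2 + g) (pos + (shift1 + m - pos)) ((rc - 1, nm, ch ++ [v]) :: rest) from by rw [← e2]]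
          exact hsim2 g

-- ===== VERDICT (by name: the statement is the Claim_ definition above) =====
theorem process_child_spec : Claim_equal_process_child := by
  intro lf start hdom hpre
  unfold Spec_process_child
  unfold Pre_process_child at hpre
  cases hc : chkNode lf (2 * lf.length + 2) start with
  | none => rw [hc] at hpre; simp at hpre
  | some sz =>
    obtain ⟨v, hA⟩ := pcA_of_chk (2 * lf.length + 2) lf start sz hc
    have hPA : process_child lf start = (sz, v) := by unfold process_child; rw [hA]; rfl
    obtain ⟨f0, c, m, shift1, ch1, v', hf0, hg1, hg2, hkk, hmv, hr⟩ := pcA_inv lf _ start (sz, v) hA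
    have hall : lf.all pvDomInt = true := (Bool.and_eq_true _ _ |>.mp hdom).1
    obtain ⟨f1, hf1le, hsim1⟩ := pcB_sim_kids lf start hall f0 c.toNat c (start+2) [0] shift1 ch1 m [] rfl hkk
    have hrun : pcB lf start (f1 + 1) (start+2) [(c, m, [0])] = some (shift1 + m - start, v') := by
      rw [hsim1 1]
      exact pcB_step_pop_nil lf start 0 shift1 0 m ch1 v' (by omega) hmv
    have hcmem : c ∈ lf := PySem.List.mem_of_pyGet?_eq_some lf hg1
    have hcbound : c.toNat ≤ 2147483648 := by
      have := List.all_eq_true.mp hall c hcmem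
      simp only [pvDomInt, decide_eq_true_eq] at this
      omega
    have hle : f1 + 1 ≤ pvBound (2 * lf.length + 2) + 2 := by
      have hb1 : f1 ≤ pvBound (f0 + 1) := by
        calc f1 ≤ c.toNat * (pvBound f0 + 2) := hf1le
        _ ≤ 2147483648 * (pvBound f0 + 2) := Nat.mul_le_mul_right _ hcbound
        _ = pvBound (f0 + 1) := rfl
      rw [← hf0] at hb1
      omega
    have hfin := pcB_mono_le lf start (f1+1) (pvBound (2 * lf.length + 2) + 2) (start+2) [(c, m, [0])] _ hle hrun
    have hPB : process_child_alt lf start = (shift1 + m - start, v') := by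
      simp only [process_child_alt, hg1, hg2]
      rw [hfin]; rfl
    rw [hPA, hPB]
    exact hr
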